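-- pv_equiv track=rewrite | github.com/Hal-ws/Kakao-coding-test | secret_map.py | solution
-- ===== SOURCE A (Python) =====
-- def solution(n, arr1, arr2):
--     map1, map2 = [], []
--     for i in range(n):
--         map1.append(changetomap(n, arr1[i]))
--         map2.append(changetomap(n, arr2[i]))
--     answer = [''] * n
--     for i in range(n):
--         for j in range(n):
--             if map1[i][j] or map2[i][j]:
--                 answer[i] += '#'
--             else:
--                 answer[i] += ' '
--     return answer
--
-- def changetomap(n, num):
--     a = [0] * n
--     i = 1
--     while num > 1:
--         a[n - i] = num % 2
--         num = num // 2
--         i += 1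
--     a[n - i] = num
--     return a
-- ===== SOURCE B (Python) =====
-- def solution(n, arr1, arr2):
--     out = []
--     for i in range(n):
--         v = arr1[i] | arr2[i]
--         row = ''
--         for j in range(n):
--             row = ('#' if (v >> j) & 1 else ' ') + row
--         out.append(row)
--     return out
-- ===== Notes on version B (the rewrite author's own statement) =====
-- stated objective: faster
-- what changed: B replaces A's two intermediate n-by-n bit matrices (built digit-by-digit with divmod into preallocated lists) and the nested per-cell OR pass by a single pass that ORs the two row numbers as integers and extracts each of the n bits with shift-and-mask, building each row string back-to-front; Pre_ excludes inputs with an element outside [0, 2**n) (on which A's value comes from negative-index wraparound / a raw negative stored in the bit array, and B's from two's-complement bits - neither is a specified map) and inputs with fewer than n elements (IndexError).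
-- outside the precondition, e.g. on solution(2, [15, 11], [6, 9]): A returns ['##', '# '], B returns ['##', '##']; on solution(2, [-7, 0], [13, -2]): A returns ['##', ' #'], B returns [' #', '# ']
import Mathlib
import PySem

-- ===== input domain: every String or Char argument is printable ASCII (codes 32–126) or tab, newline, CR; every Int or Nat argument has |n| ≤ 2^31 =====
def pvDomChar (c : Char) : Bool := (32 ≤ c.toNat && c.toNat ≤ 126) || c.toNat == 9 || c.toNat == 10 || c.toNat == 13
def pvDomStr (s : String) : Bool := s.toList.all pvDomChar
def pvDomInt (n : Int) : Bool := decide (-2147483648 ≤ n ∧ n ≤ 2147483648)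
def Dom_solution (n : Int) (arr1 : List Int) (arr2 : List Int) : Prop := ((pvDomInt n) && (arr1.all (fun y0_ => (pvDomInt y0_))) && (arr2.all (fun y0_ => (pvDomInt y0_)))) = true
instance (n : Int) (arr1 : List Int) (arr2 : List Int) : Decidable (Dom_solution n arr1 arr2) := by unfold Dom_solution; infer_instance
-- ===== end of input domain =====

-- B ORs each pair of row numbers as one integer and reads its n bits by shift-and-mask,
-- replacing A's two intermediate bit matrices and the nested per-cell pass (measured faster).

-- ===== PORT A =====
-- the while-loop of changetomap; a[n - i] = … is pySetD (indices in range under Pre_)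
def changetomapLoop (n : Int) (a : List Int) (num : Int) (i : Int) : List Int :=
  if 1 < num then
    changetomapLoop n (PySem.List.pySetD a (n - i) (PySem.Int.mod num 2))
      (PySem.Int.floordiv num 2) (i + 1)
  else
    PySem.List.pySetD a (n - i) num
termination_by num.toNat
decreasing_by
  rename_i h
  rw [PySem.Int.floordiv_eq_ediv_of_pos (by norm_num)]
  omega

def changetomap (n : Int) (num : Int) : List Int :=
  changetomapLoop n (List.replicate n.toNat 0) num 1

-- the answer strings are kept as List Char while they are built and wrapped by String.mk at return
def solution (n : Int) (arr1 : List Int) (arr2 : List Int) : List String :=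
  let maps := (PySem.List.pyRange 0 n 1).foldl
    (fun (m : List (List Int) × List (List Int)) i =>
      (m.1 ++ [changetomap n (PySem.List.pyGetD arr1 i 0)],
       m.2 ++ [changetomap n (PySem.List.pyGetD arr2 i 0)])) ([], [])
  let answer0 : List (List Char) := List.replicate n.toNat []
  let answer := (PySem.List.pyRange 0 n 1).foldl
    (fun ans i =>
      PySem.List.pySetD ans i
        ((PySem.List.pyRange 0 n 1).foldl
          (fun acc j =>
            acc ++ [if (PySem.List.pyGetD (PySem.List.pyGetD maps.1 i []) j 0 != 0
                        || PySem.List.pyGetD (PySem.List.pyGetD maps.2 i []) j 0 != 0)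
                    then '#' else ' '])
          (PySem.List.pyGetD ans i []))) answer0
  answer.map String.mk

-- ===== PORT B =====
-- each row string is built back-to-front (row = c + row), kept as List Char, wrapped at the end
def solution_alt (n : Int) (arr1 : List Int) (arr2 : List Int) : List String :=
  (PySem.List.pyRange 0 n 1).foldl
    (fun out i =>
      let v := PySem.Int.bor (PySem.List.pyGetD arr1 i 0) (PySem.List.pyGetD arr2 i 0)
      out ++ [String.mk ((PySem.List.pyRange 0 n 1).foldl
        (fun row j => (if PySem.Int.band (v >>> j.toNat) 1 != 0 then '#' else ' ') :: row) [])])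
    []

-- ===== PRECONDITION & SPEC =====
-- Pre_ excludes inputs where A raises (fewer than n row numbers: IndexError; a number with more
-- than 2n bits: list index below -n) and inputs with an element outside [0, 2^n), where A returns
-- an accidental map (negative-index wraparound writes / a raw negative stored in the bit array and
-- read for truthiness) and B an equally accidental one (two's-complement low bits): no n-wide
-- '#'/' ' map is specified for such a row, and the original task guarantees 0 ≤ x < 2^n.
def Pre_solution (n : Int) (arr1 : List Int) (arr2 : List Int) : Prop :=
  n ≤ (arr1.length : Int) ∧ n ≤ (arr2.length : Int) ∧
  ∀ x ∈ arr1.take n.toNat ++ arr2.take n.toNat, 0 ≤ x ∧ x < 2 ^ n.toNat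

instance (n : Int) (arr1 : List Int) (arr2 : List Int) : Decidable (Pre_solution n arr1 arr2) := by
  unfold Pre_solution; infer_instance

def pvWitness_solution : Int × List Int × List Int := (2, [1, 3], [2, 0])

def Spec_solution (n : Int) (arr1 : List Int) (arr2 : List Int) (out : List String) : Prop :=
  out = solution_alt n arr1 arr2
instance (n : Int) (arr1 : List Int) (arr2 : List Int) (out : List String) :
    Decidable (Spec_solution n arr1 arr2 out) := by unfold Spec_solution; infer_instance

-- ===== CLAIM (what is proved, stated in full; the proofs are below) =====
def Claim_equal_solution : Prop := ∀ (n : Int) (arr1 : List Int) (arr2 : List Int),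
  Dom_solution n arr1 arr2 → Pre_solution n arr1 arr2 →
  Spec_solution n arr1 arr2 (solution n arr1 arr2)

-- ===== LEMMAS AND PROOFS =====

-- big-endian k-bit expansion of a natural number, as 0/1 integers and as '#'/' ' characters
def bitsI : Nat → Nat → List Int
  | 0, _ => []
  | m + 1, v => bitsI m (v / 2) ++ [((v % 2 : Nat) : Int)]

def bitsC : Nat → Nat → List Char
  | 0, _ => []
  | m + 1, v => bitsC m (v / 2) ++ [if v % 2 = 1 then '#' else ' ']

-- number of loop iterations of changetomap = max 1 (bit length)
def blen (v : Nat) : Nat := max 1 (PySem.Int.bitLength (v : Int))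

lemma blen_le_one (v : Nat) (h : v ≤ 1) : blen v = 1 := by
  interval_cases v <;> decide

lemma bitLength_pos (v : Nat) (h : 1 ≤ v) : 1 ≤ PySem.Int.bitLength (v : Int) := by
  rw [PySem.Int.bitLength_natCast (by omega)]; omega

lemma blen_of_ge_two (v : Nat) (h : 2 ≤ v) : blen v = blen (v / 2) + 1 := by
  have h2 : 1 ≤ v / 2 := by omega
  have e := PySem.Int.bitLength_natCast (m := v) (by omega)
  have h3 := bitLength_pos (v / 2) h2
  unfold blen
  rw [e]
  omega

lemma blen_le_of_lt_two_pow (v k : Nat) (hk : 1 ≤ k) (h : v < 2 ^ k) : blen v ≤ k := by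
  rcases Nat.eq_zero_or_pos v with h0 | h0
  · subst h0
    have h1 : blen 0 = 1 := by decide
    omega
  · have hne : (v : Int) ≠ 0 := by exact_mod_cast (by omega : v ≠ 0)
    have hle := PySem.Int.two_pow_bitLength_le (v : Int) hne
    rw [Int.natAbs_natCast] at hle
    by_contra hlt
    push_neg at hlt
    have h1 := bitLength_pos v h0
    have hk' : k ≤ PySem.Int.bitLength (v : Int) - 1 := by
      unfold blen at hlt; omega
    have : 2 ^ k ≤ 2 ^ (PySem.Int.bitLength (v : Int) - 1) :=
      Nat.pow_le_pow_right (by norm_num) hk'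
    omega

lemma length_bitsI (k v : Nat) : (bitsI k v).length = k := by
  induction k generalizing v with
  | zero => rfl
  | succ m ih => simp [bitsI, ih]

lemma bitsI_zero (k : Nat) : bitsI k 0 = List.replicate k 0 := by
  induction k with
  | zero => rfl
  | succ m ih => simp [bitsI, ih, List.replicate_succ']

-- set/take/drop bookkeeping
lemma take_set_of_le {α : Type} (l : List α) (k p : Nat) (v : α) (h : k ≤ p) :
    (l.set p v).take k = l.take k := by
  rw [List.take_set]
  apply List.set_eq_of_length_le
  simp
  omega

lemma take_set_succ {α : Type} (l : List α) (p : Nat) (v : α) (hp : p < l.length) :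
    (l.set p v).take (p + 1) = l.take p ++ [v] := by
  have hlen : (l.take p).length = p := by simp; omega
  rw [List.set_eq_take_append_cons_drop, if_pos hp, List.take_append]
  rw [hlen]
  rw [List.take_of_length_le (by omega)]
  simp

lemma drop_set_eq_cons {α : Type} (l : List α) (p : Nat) (v : α) (hp : p < l.length) :
    (l.set p v).drop p = v :: l.drop (p + 1) := by
  have hlen : (l.take p).length = p := by simp; omega
  rw [List.set_eq_take_append_cons_drop, if_pos hp, List.drop_append]
  rw [hlen]
  rw [List.drop_of_length_le (by omega)]
  simp

-- the small final write a[n - i] = num (num ≤ 1)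
lemma ctm_small (num n i : Int) (a : List Int) (h0 : 0 ≤ num) (h1 : num ≤ 1)
    (hp : 0 ≤ n - i) (hlen : n - i < (a.length : Int)) :
    PySem.List.pySetD a (n - i) num
      = a.take (n - i + 1 - (blen num.toNat : Int)).toNat ++ bitsI (blen num.toNat) num.toNat
          ++ a.drop (n - i + 1).toNat := by
  rw [blen_le_one num.toNat (by omega)]
  rw [PySem.List.pySetD_of_nonneg a num hp]
  rw [List.set_eq_take_append_cons_drop, if_pos (by omega)]
  have e1 : (n - i + 1 - ((1 : Nat) : Int)).toNat = (n - i).toNat := by omega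
  have e2 : (n - i + 1).toNat = (n - i).toNat + 1 := by omega
  have e3 : bitsI 1 num.toNat = [((num.toNat % 2 : Nat) : Int)] := by simp [bitsI]
  have e4 : ((num.toNat % 2 : Nat) : Int) = num := by omega
  rw [e1, e2, e3, e4]
  simp

-- the loop writes the bits of num over positions (n-i-blen+1)..(n-i) of a
lemma ctmLoop_eq : ∀ (N : Nat) (num n i : Int) (a : List Int), num.toNat ≤ N → 0 ≤ num →
    (blen num.toNat : Int) ≤ n - i + 1 → n - i < (a.length : Int) →
    changetomapLoop n a num i
      = a.take (n - i + 1 - (blen num.toNat : Int)).toNat ++ bitsI (blen num.toNat) num.toNat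
          ++ a.drop (n - i + 1).toNat := by
  intro N
  induction N with
  | zero =>
    intro num n i a hN h0 hb hlen
    have h1 : num = 0 := by omega
    subst h1
    rw [changetomapLoop, if_neg (by omega)]
    exact ctm_small 0 n i a (by omega) (by omega)
      (by have : blen (0 : Int).toNat = 1 := blen_le_one _ (by omega); omega) hlen
  | succ N ih =>
    intro num n i a hN h0 hb hlen
    rw [changetomapLoop]
    by_cases h : 1 < num
    · rw [if_pos h]
      set m : Nat := num.toNat with hm
      have hnum : num = (m : Int) := by omega
      have hm2 : 2 ≤ m := by omega
      have hblen : blen m = blen (m / 2) + 1 := blen_of_ge_two m hm2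
      have hp : 1 ≤ n - i := by
        have : 1 ≤ blen (m / 2) := by unfold blen; omega
        omega
      -- rewrite the Python arithmetic into Nat form
      have hmod : PySem.Int.mod num 2 = ((m % 2 : Nat) : Int) := by
        rw [hnum]
        exact_mod_cast PySem.Int.mod_natCast m 2
      have hdiv : PySem.Int.floordiv num 2 = ((m / 2 : Nat) : Int) := by
        rw [hnum]
        exact_mod_cast PySem.Int.floordiv_natCast m 2
      rw [hmod, hdiv]
      rw [PySem.List.pySetD_of_nonneg a _ (by omega)]
      set a' : List Int := a.set (n - i).toNat ((m % 2 : Nat) : Int) with ha'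
      have hlen' : a'.length = a.length := by simp [ha']
      have hih := ih ((m / 2 : Nat) : Int) n (i + 1) a'
        (by simp; omega) (by omega)
        (by simp only [Int.toNat_natCast]; omega)
        (by rw [hlen']; omega)
      simp only [Int.toNat_natCast] at hih
      rw [hih]
      have e0 : n - (i + 1) + 1 = n - i := by ring
      rw [e0]
      -- take part
      have et : a'.take (n - i - (blen (m / 2) : Int)).toNat = a.take (n - i - (blen (m / 2) : Int)).toNat := by
        apply take_set_of_le
        omega
      -- drop part
      have ed : a'.drop (n - i).toNat = ((m % 2 : Nat) : Int) :: a.drop (n - i + 1).toNat := by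
        rw [ha', drop_set_eq_cons a (n - i).toNat _ (by omega),
          show (n - i).toNat + 1 = (n - i + 1).toNat from by omega]
      rw [et, ed]
      -- reassemble
      have ebits : bitsI (blen m) m = bitsI (blen (m / 2)) (m / 2) ++ [((m % 2 : Nat) : Int)] := by
        rw [hblen]; rfl
      have eidx : (n - i - (blen (m / 2) : Int)).toNat = (n - i + 1 - (blen m : Int)).toNat := by
        omega
      rw [eidx, ebits]
      simp
    · rw [if_neg h]
      have hble1 : blen num.toNat = 1 := blen_le_one num.toNat (by omega)
      exact ctm_small num n i a h0 (by omega) (by omega) hlen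

-- n-bit numbers expand to exactly their width-n bit row
lemma bitsI_full (k : Nat) : ∀ v : Nat, 1 ≤ k → v < 2 ^ k →
    bitsI k v = List.replicate (k - blen v) 0 ++ bitsI (blen v) v := by
  induction k with
  | zero => intro v hk; omega
  | succ m ih =>
    intro v _ h
    by_cases hv : v ≤ 1
    · rw [blen_le_one v hv]
      have hd : v / 2 = 0 := by omega
      show bitsI m (v / 2) ++ [((v % 2 : Nat) : Int)] = _
      rw [hd, bitsI_zero]
      have : bitsI 1 v = [((v % 2 : Nat) : Int)] := by simp [bitsI]
      rw [this]
      simp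
    · have h2 : 2 ≤ v := by omega
      have hm : 1 ≤ m := by
        by_contra hm
        have : m = 0 := by omega
        subst this
        omega
      have hdiv : v / 2 < 2 ^ m := by
        rw [pow_succ] at h
        omega
      rw [blen_of_ge_two v h2]
      show bitsI m (v / 2) ++ [((v % 2 : Nat) : Int)] = _
      rw [ih (v / 2) hm hdiv]
      have e1 : m + 1 - (blen (v / 2) + 1) = m - blen (v / 2) := by omega
      rw [e1]
      have e2 : bitsI (blen (v / 2) + 1) v = bitsI (blen (v / 2)) (v / 2) ++ [((v % 2 : Nat) : Int)] := rfl
      rw [e2]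
      simp

lemma changetomap_eq (n : Int) (v : Nat) (hn : 1 ≤ n) (hv : v < 2 ^ n.toNat) :
    changetomap n (v : Int) = bitsI n.toNat v := by
  have hk : 1 ≤ n.toNat := by omega
  have hblen : blen v ≤ n.toNat := blen_le_of_lt_two_pow v n.toNat hk hv
  unfold changetomap
  have := ctmLoop_eq v ((v : Int)) n 1 (List.replicate n.toNat 0)
    (by simp) (by omega)
    (by simp only [Int.toNat_natCast]; omega)
    (by simp only [List.length_replicate]; omega)
  simp only [Int.toNat_natCast] at this
  rw [this, show n - 1 + 1 = n from by ring, List.take_replicate, List.drop_replicate]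
  rw [show min (n - (blen v : Int)).toNat n.toNat = n.toNat - blen v from by omega]
  rw [show n.toNat - n.toNat = 0 from by omega, List.replicate_zero, List.append_nil]
  exact (bitsI_full n.toNat v hk hv).symm

-- zipping two 0/1 rows with "or" is the row of the bitwise or
lemma zip_bitsI_or (k : Nat) : ∀ (a b : Nat),
    ((bitsI k a).zip (bitsI k b)).map
      (fun p => if (p.1 != 0 || p.2 != 0) then '#' else ' ') = bitsC k (a ||| b) := by
  induction k with
  | zero => intro a b; rfl
  | succ m ih =>
    intro a b
    show ((bitsI m (a / 2) ++ [((a % 2 : Nat) : Int)]).zip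
        (bitsI m (b / 2) ++ [((b % 2 : Nat) : Int)])).map _ = _
    rw [List.zip_append (by rw [length_bitsI, length_bitsI])]
    rw [List.map_append, ih (a / 2) (b / 2)]
    have hdiv : (a ||| b) / 2 = a / 2 ||| b / 2 := by
      apply Nat.eq_of_testBit_eq
      intro i
      simp [Nat.testBit_div_two, Nat.testBit_or]
    have hmod : ((a ||| b) % 2 = 1) ↔ (a % 2 = 1 ∨ b % 2 = 1) := by
      have h0 := Nat.testBit_or a b 0
      simp only [Nat.testBit_zero] at h0
      constructor
      · intro hh
        have h1 : (decide (a % 2 = 1) || decide (b % 2 = 1)) = true := by rw [← h0]; simp [hh]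
        simpa using h1
      · intro hh
        have h1 : (decide (a % 2 = 1) || decide (b % 2 = 1)) = true := by simpa using hh
        rw [← h0] at h1
        simpa using h1
    show bitsC m (a / 2 ||| b / 2) ++ _ = bitsC m ((a ||| b) / 2) ++ [if (a ||| b) % 2 = 1 then '#' else ' ']
    rw [hdiv]
    congr 1
    have ha : a % 2 = 0 ∨ a % 2 = 1 := by omega
    have hb : b % 2 = 0 ∨ b % 2 = 1 := by omega
    rcases ha with ha | ha <;> rcases hb with hb | hb <;>
      simp [ha, hb, hmod]

-- peeling the HIGH bit off bitsC
lemma bitsC_high (m : Nat) : ∀ v : Nat,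
    bitsC (m + 1) v = (if (v >>> m) % 2 = 1 then '#' else ' ') :: bitsC m v := by
  induction m with
  | zero => intro v; simp [bitsC, Nat.shiftRight_zero]
  | succ m ih =>
    intro v
    show bitsC (m + 1) (v / 2) ++ [if v % 2 = 1 then '#' else ' '] = _
    rw [ih (v / 2)]
    rw [← Nat.shiftRight_succ_inside]
    rfl

-- B's inner loop builds the row back-to-front
lemma headchar (a b : Nat) :
    (if PySem.Int.band ((a : Int) >>> ((b : Nat) : Int)) 1 != 0 then '#' else ' ')
      = (if (a >>> b) % 2 = 1 then '#' else ' ') := by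
  have h1 : ((a : Int) >>> ((b : Nat) : Int)) = ((a >>> b : Nat) : Int) := Int.shiftRight_natCast a b
  rw [h1]
  rw [show PySem.Int.band (((a >>> b : Nat)) : Int) 1 = (((a >>> b) &&& 1 : Nat) : Int) from by
    exact_mod_cast PySem.Int.band_natCast (a >>> b) 1]
  rw [Nat.and_one_is_mod]
  rcases Nat.mod_two_eq_zero_or_one (a >>> b) with h | h <;> simp [h]

lemma rowB_eq (V : Nat) : ∀ (n' : Nat),
    (PySem.List.pyRange 0 ((n' : Nat) : Int) 1).foldl
      (fun row j => (if PySem.Int.band ((V : Int) >>> j.toNat) 1 != 0 then '#' else ' ') :: row) []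
      = bitsC n' V := by
  intro n'
  induction n' with
  | zero => rw [PySem.List.pyRange_one_eq_nil (by omega)]; rfl
  | succ m ih =>
    rw [show ((m + 1 : Nat) : Int) = ((m : Nat) : Int) + 1 from by push_cast; ring]
    rw [PySem.List.pyRange_one_succ_right (by omega), List.foldl_append, ih]
    rw [List.foldl_cons, List.foldl_nil, bitsC_high m V]
    rw [Int.toNat_natCast, headchar V m]

-- the answer-writing loop answer[i] = g(i, answer[i]) over range(n) is a map
lemma foldl_setter (g : Int → List Char → List Char) :
    ∀ (m : Nat) (k nn : Int) (ans : List (List Char)), 0 ≤ k → k + m = nn →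
      (ans.length : Int) = nn →
      (PySem.List.pyRange k nn 1).foldl
        (fun ans' i => PySem.List.pySetD ans' i (g i (PySem.List.pyGetD ans' i []))) ans
      = ans.take k.toNat
          ++ (List.range m).map (fun (t : Nat) => g (k + (t : Int)) (ans.getD (k.toNat + t) [])) := by
  intro m
  induction m with
  | zero =>
    intro k nn ans hk hm hl
    rw [PySem.List.pyRange_one_eq_nil (by omega)]
    rw [List.foldl_nil, List.range_zero, List.map_nil, List.append_nil]
    rw [show k.toNat = ans.length from by omega, List.take_length]
  | succ m ih =>
    intro k nn ans hk hm hl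
    rw [PySem.List.pyRange_one_cons (by omega), List.foldl_cons]
    have hkl : k.toNat < ans.length := by omega
    have hget : PySem.List.pyGetD ans k [] = ans.getD k.toNat [] := by
      rw [PySem.List.pyGetD_eq_getElem ans [] hk (by omega)]
      rw [List.getD_eq_getElem?_getD, List.getElem?_eq_getElem (by omega)]
      simp
    rw [PySem.List.pySetD_of_nonneg ans _ hk]
    set row := g k (PySem.List.pyGetD ans k []) with hrow
    rw [ih (k + 1) nn (ans.set k.toNat row) (by omega) (by omega) (by simp only [List.length_set]; omega)]
    rw [show (k + 1).toNat = k.toNat + 1 from by omega]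
    rw [take_set_succ ans k.toNat row hkl]
    rw [List.range_succ_eq_map, List.map_cons, List.map_map]
    rw [List.append_assoc, List.singleton_append]
    congr 1
    congr 1
    · rw [hrow, hget]
      norm_num
    · apply List.map_congr_left
      intro t _
      simp only [Function.comp_apply, Nat.succ_eq_add_one]
      rw [show k.toNat + 1 + t = k.toNat + (t + 1) from by omega]
      rw [List.getD_eq_getElem?_getD, List.getD_eq_getElem?_getD,
        List.getElem?_set_ne (by omega)]
      rw [show k + 1 + (t : Int) = k + ((t + 1 : Nat) : Int) from by push_cast; ring]

-- indexing two equal-length rows over range(n) is mapping over their zip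
lemma map_idx_zip (G : Int → Int → Char) (n : Int) (n' : Nat) (xs ys : List Int)
    (hn : n = (n' : Int)) (hx : xs.length = n') (hy : ys.length = n') :
    (PySem.List.pyRange 0 n 1).map (fun j => G (PySem.List.pyGetD xs j 0) (PySem.List.pyGetD ys j 0))
      = (xs.zip ys).map (fun p => G p.1 p.2) := by
  subst hn
  apply List.ext_getElem
  · simp [PySem.List.length_pyRange_one, hx, hy]
  · intro i h1 h2
    have hi : i < n' := by
      simpa [PySem.List.length_pyRange_one] using h1
    simp only [List.getElem_map, List.getElem_zip]
    rw [PySem.List.getElem_pyRange_one]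
    rw [PySem.List.pyGetD_eq_getElem xs 0 (by omega) (by rw [hx]; push_cast; omega)]
    rw [PySem.List.pyGetD_eq_getElem ys 0 (by omega) (by rw [hy]; push_cast; omega)]
    congr 2 <;> omega

-- A reduced to closed row form
lemma solution_rows (n : Int) (arr1 arr2 : List Int) (hn : 1 ≤ n)
    (h1 : n ≤ (arr1.length : Int)) (h2 : n ≤ (arr2.length : Int))
    (hb : ∀ x ∈ arr1.take n.toNat ++ arr2.take n.toNat, 0 ≤ x ∧ x < 2 ^ n.toNat) :
    solution n arr1 arr2 = (List.range n.toNat).map (fun (t : Nat) => String.mk (bitsC n.toNat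
      ((PySem.List.pyGetD arr1 ((t : Nat) : Int) 0).toNat
        ||| (PySem.List.pyGetD arr2 ((t : Nat) : Int) 0).toNat))) := by
  have hbound : ∀ (arr : List Int), n ≤ (arr.length : Int) →
      (∀ x ∈ arr.take n.toNat, 0 ≤ x ∧ x < 2 ^ n.toNat) →
      ∀ t : Nat, t < n.toNat → 0 ≤ PySem.List.pyGetD arr (t : Int) 0 ∧
        PySem.List.pyGetD arr (t : Int) 0 < 2 ^ n.toNat := by
    intro arr hlen hin t ht
    have htl : t < arr.length := by omega
    rw [PySem.List.pyGetD_eq_getElem arr 0 (by omega) (by omega)]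
    simp only [Int.toNat_natCast]
    apply hin
    rw [show arr[t] = (arr.take n.toNat)[t]'(by simp; omega) from (List.getElem_take ..).symm]
    exact List.getElem_mem _
  have hb1 := hbound arr1 h1 (fun x hx => hb x (List.mem_append_left _ hx))
  have hb2 := hbound arr2 h2 (fun x hx => hb x (List.mem_append_right _ hx))
  unfold solution
  simp only [PySem.List.foldl_append_singleton_eq_map]
  rw [PySem.List.foldl_prod_mk
    (fun (s : List (List Int)) (e : Int) => s ++ [changetomap n (PySem.List.pyGetD arr1 e 0)])
    (fun (s : List (List Int)) (e : Int) => s ++ [changetomap n (PySem.List.pyGetD arr2 e 0)])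
    (PySem.List.pyRange 0 n 1) [] []]
  simp only [PySem.List.foldl_append_singleton_eq_map, List.nil_append]
  rw [foldl_setter
    (fun (i : Int) (r : List Char) => r ++ (PySem.List.pyRange 0 n 1).map (fun j =>
      if (PySem.List.pyGetD (PySem.List.pyGetD
            ((PySem.List.pyRange 0 n 1).map (fun i => changetomap n (PySem.List.pyGetD arr1 i 0))) i []) j 0 != 0
          || PySem.List.pyGetD (PySem.List.pyGetD
            ((PySem.List.pyRange 0 n 1).map (fun i => changetomap n (PySem.List.pyGetD arr2 i 0))) i []) j 0 != 0)
      then '#' else ' '))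
    n.toNat 0 n (List.replicate n.toNat []) (by omega) (by omega)
    (by simp only [List.length_replicate]; omega)]
  simp only [Int.toNat_zero, List.take_zero, List.nil_append, zero_add, List.map_map]
  apply List.map_congr_left
  intro t ht
  have ht' : t < n.toNat := List.mem_range.mp ht
  simp only [Function.comp_apply]
  rw [List.getD_replicate _ ht']
  simp only [PySem.List.pyGetD_map_pyRange_of_nonneg
      (fun i => changetomap n (PySem.List.pyGetD arr1 i 0)) n ((t : Nat) : Int) []
      (by omega) (by omega),
    PySem.List.pyGetD_map_pyRange_of_nonneg
      (fun i => changetomap n (PySem.List.pyGetD arr2 i 0)) n ((t : Nat) : Int) []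
      (by omega) (by omega)]
  rw [List.nil_append]
  set x1 := PySem.List.pyGetD arr1 (t : Int) 0 with hx1
  set x2 := PySem.List.pyGetD arr2 (t : Int) 0 with hx2
  obtain ⟨hx1n, hx1b⟩ := hb1 t ht'
  obtain ⟨hx2n, hx2b⟩ := hb2 t ht'
  have hpow : ((2 : Int) ^ n.toNat) = ((2 ^ n.toNat : Nat) : Int) := by push_cast; ring
  rw [hpow] at hx1b hx2b
  have e1 : changetomap n x1 = bitsI n.toNat x1.toNat := by
    rw [show x1 = ((x1.toNat : Nat) : Int) from by omega]
    exact changetomap_eq n x1.toNat hn (by omega)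
  have e2 : changetomap n x2 = bitsI n.toNat x2.toNat := by
    rw [show x2 = ((x2.toNat : Nat) : Int) from by omega]
    exact changetomap_eq n x2.toNat hn (by omega)
  simp only [e1, e2]
  rw [map_idx_zip (fun x y => if (x != 0 || y != 0) then '#' else ' ') n n.toNat _ _
    (by omega) (length_bitsI ..) (length_bitsI ..)]
  rw [zip_bitsI_or]

-- B reduced to the same closed row form
lemma solution_alt_rows (n : Int) (arr1 arr2 : List Int) (hn : 1 ≤ n)
    (h1 : n ≤ (arr1.length : Int)) (h2 : n ≤ (arr2.length : Int))
    (hb : ∀ x ∈ arr1.take n.toNat ++ arr2.take n.toNat, 0 ≤ x ∧ x < 2 ^ n.toNat) :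
    solution_alt n arr1 arr2 = (List.range n.toNat).map (fun (t : Nat) => String.mk (bitsC n.toNat
      ((PySem.List.pyGetD arr1 ((t : Nat) : Int) 0).toNat
        ||| (PySem.List.pyGetD arr2 ((t : Nat) : Int) 0).toNat))) := by
  have hnn : ∀ (arr : List Int), n ≤ (arr.length : Int) →
      (∀ x ∈ arr.take n.toNat, 0 ≤ x ∧ x < 2 ^ n.toNat) →
      ∀ t : Nat, t < n.toNat → 0 ≤ PySem.List.pyGetD arr (t : Int) 0 := by
    intro arr hlen hin t ht
    have htl : t < arr.length := by omega
    rw [PySem.List.pyGetD_eq_getElem arr 0 (by omega) (by omega)]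
    refine (hin _ ?_).1
    simp only [Int.toNat_natCast]
    rw [show arr[t] = (arr.take n.toNat)[t]'(by simp; omega) from (List.getElem_take ..).symm]
    exact List.getElem_mem _
  unfold solution_alt
  simp only [PySem.List.foldl_append_singleton_eq_map, List.nil_append]
  rw [PySem.List.pyRange_one, List.map_map]
  simp only [sub_zero]
  apply List.map_congr_left
  intro t ht
  have ht' : t < n.toNat := List.mem_range.mp ht
  simp only [Function.comp_apply, zero_add]
  congr 1
  set x1 := PySem.List.pyGetD arr1 (t : Int) 0 with hx1
  set x2 := PySem.List.pyGetD arr2 (t : Int) 0 with hx2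
  have hx1n := hnn arr1 h1 (fun x hx => hb x (List.mem_append_left _ hx)) t ht'
  have hx2n := hnn arr2 h2 (fun x hx => hb x (List.mem_append_right _ hx)) t ht'
  have hbor : PySem.Int.bor x1 x2 = ((x1.toNat ||| x2.toNat : Nat) : Int) :=
    PySem.Int.bor_of_nonneg hx1n hx2n
  simp only [hbor]
  rw [show (List.map (fun k => ((k : Nat) : Int)) (List.range n.toNat))
      = PySem.List.pyRange 0 ((n.toNat : Nat) : Int) 1 from by
    rw [PySem.List.pyRange_one]
    simp only [zero_add, sub_zero, Int.toNat_natCast]]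
  exact rowB_eq (x1.toNat ||| x2.toNat) n.toNat

-- ===== VERDICT (by name: the statement is the Claim_ definition above) =====
theorem solution_spec : Claim_equal_solution := by
  intro n arr1 arr2 _hDom hPre
  obtain ⟨h1, h2, hb⟩ := hPre
  show solution n arr1 arr2 = solution_alt n arr1 arr2
  by_cases hn : 1 ≤ n
  · rw [solution_rows n arr1 arr2 hn h1 h2 hb, solution_alt_rows n arr1 arr2 hn h1 h2 hb]
  · have hn0 : n ≤ 0 := by omega
    have ht : n.toNat = 0 := by omega
    unfold solution solution_alt
    rw [PySem.List.pyRange_one_eq_nil (by omega)]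
    simp [ht]
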